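-- pv_equiv track=rewrite | github.com/suttacentral/legacy-suttacentral | src/textfunctions.py | vel_to_uni
-- ===== SOURCE A (Python) =====
-- def vel_to_uni(string):
--     # Note: In python, literals/constants (such as tuples) in a function
--     # are compiled into the function - the tuple is not re-created on each
--     # call. Python is basically awesome :).
--     rules = (
--         ('aa', 'ā'),
--         ('ii', 'ī'),
--         ('uu', 'ū'),
--         ('.t', 'ṭ'),
--         ('.d', 'ḍ'),
--         ('~n', 'ñ'),
--         ('.n', 'ṇ'),
--         ('"n', 'ṅ'),
--         ('.l', 'ḷ'),
--         ('.m', 'ṃ'),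
--         )
--
--     for rule, repl in rules:
--         string = string.replace(rule, repl)
--     return string
-- ===== SOURCE B (Python) =====
-- def vel_to_uni(string):
--     table = {
--         'aa': 'ā', 'ii': 'ī', 'uu': 'ū',
--         '.t': 'ṭ', '.d': 'ḍ', '~n': 'ñ',
--         '.n': 'ṇ', '"n': 'ṅ', '.l': 'ḷ', '.m': 'ṃ',
--     }
--     out = []
--     i = 0
--     n = len(string)
--     while i < n:
--         repl = table.get(string[i:i + 2])
--         if repl is not None:
--             out.append(repl)
--             i += 2
--         else:
--             out.append(string[i])
--             i += 1
--     return ''.join(out)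
-- ===== Notes on version B (the rewrite author's own statement) =====
-- stated objective: alternative
-- what changed: Replaces the ten sequential full-string str.replace passes with a single left-to-right scan that looks each two-character window up in a dict, emitting the replacement and advancing by 2 on a hit, else copying one character; it trades ten C-implemented passes for one interpreted pass.
import Mathlib
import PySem

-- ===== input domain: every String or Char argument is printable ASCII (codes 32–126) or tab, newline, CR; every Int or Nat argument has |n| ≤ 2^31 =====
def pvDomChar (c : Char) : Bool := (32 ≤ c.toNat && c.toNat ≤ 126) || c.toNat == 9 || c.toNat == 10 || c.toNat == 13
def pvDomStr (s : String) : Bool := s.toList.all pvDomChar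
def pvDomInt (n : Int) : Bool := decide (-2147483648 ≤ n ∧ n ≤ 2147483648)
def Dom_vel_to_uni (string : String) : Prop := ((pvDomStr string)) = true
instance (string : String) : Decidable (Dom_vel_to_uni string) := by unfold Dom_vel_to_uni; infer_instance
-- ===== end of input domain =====

-- B replaces A's ten sequential full-string replace passes by a single left-to-right
-- scan with a lookup table (objective: alternative — one pass over the string, not ten).

-- ===== PORT A =====
-- the ten Velthuis rules, in A's order
def velRules : List (String × String) :=
  [("aa", "ā"), ("ii", "ī"), ("uu", "ū"), (".t", "ṭ"), (".d", "ḍ"),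
   ("~n", "ñ"), (".n", "ṇ"), ("\"n", "ṅ"), (".l", "ḷ"), (".m", "ṃ")]

-- for rule, repl in rules: string = string.replace(rule, repl)
def vel_to_uni (string : String) : String :=
  velRules.foldl (fun s p => PySem.Str.replace s p.1 p.2) string

-- ===== PORT B =====
-- Source B's dict, as an association list keyed by the two-character window
def velTable : List ((Char × Char) × Char) :=
  [(('a', 'a'), 'ā'), (('i', 'i'), 'ī'), (('u', 'u'), 'ū'), (('.', 't'), 'ṭ'),
   (('.', 'd'), 'ḍ'), (('~', 'n'), 'ñ'), (('.', 'n'), 'ṇ'), (('"', 'n'), 'ṅ'),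
   (('.', 'l'), 'ḷ'), (('.', 'm'), 'ṃ')]

-- the while loop: look the 2-char window up; on a hit emit the replacement and advance
-- by two, otherwise copy one character and advance by one
def velScan : List Char → List Char
  | [] => []
  | [c] => [c]
  | c0 :: c1 :: t =>
    match velTable.lookup (c0, c1) with
    | some r => r :: velScan t
    | none => c0 :: velScan (c1 :: t)

def vel_to_uni_alt (string : String) : String :=
  String.ofList (velScan string.toList)

-- ===== PRECONDITION & SPEC =====
def Spec_vel_to_uni (string : String) (out : String) : Prop := out = vel_to_uni_alt string
instance (string : String) (out : String) : Decidable (Spec_vel_to_uni string out) := by unfold Spec_vel_to_uni; infer_instance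

-- ===== CLAIM (what is proved, stated in full; the proofs are below) =====
def Claim_equal_vel_to_uni : Prop := ∀ (string : String), Dom_vel_to_uni string → Spec_vel_to_uni string (vel_to_uni string)

-- ===== LEMMAS AND PROOFS =====

-- structural model of Python's str.replace for a 2-char pattern and 1-char replacement
def repFn (p0 p1 r : Char) : List Char → List Char
  | [] => []
  | [c] => [c]
  | c0 :: c1 :: t =>
    if c0 = p0 ∧ c1 = p1 then r :: repFn p0 p1 r t
    else c0 :: repFn p0 p1 r (c1 :: t)

lemma go_eq (p0 p1 r : Char) :
    ∀ (fuel : Nat) (l acc : List Char), l.length ≤ fuel →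
      PySem.Chars.replace.go [p0, p1] [r] fuel l acc = acc.reverse ++ repFn p0 p1 r l := by
  intro fuel
  induction fuel with
  | zero =>
    intro l acc hl
    have : l = [] := List.eq_nil_of_length_eq_zero (Nat.le_zero.mp hl)
    subst this
    simp [PySem.Chars.replace.go, repFn]
  | succ n ih =>
    intro l acc hl
    cases l with
    | nil => simp [PySem.Chars.replace.go, repFn]
    | cons c t =>
      rw [PySem.Chars.replace.go]
      by_cases hp : List.isPrefixOf [p0, p1] (c :: t) = true
      · rw [if_pos hp]
        obtain ⟨c1, t', rfl⟩ : ∃ c1 t', t = c1 :: t' := by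
          cases t with
          | nil => simp [List.isPrefixOf] at hp
          | cons a b => exact ⟨a, b, rfl⟩
        have hc : c = p0 ∧ c1 = p1 := by
          simp [List.isPrefixOf] at hp
          exact ⟨hp.1.symm, hp.2.symm⟩
        obtain ⟨rfl, rfl⟩ := hc
        have hlen : t'.length ≤ n := by
          simp at hl; omega
        simp only [List.length_cons, List.length_nil, List.drop_succ_cons, List.drop_zero]
        rw [ih _ _ hlen]
        simp [repFn]
      · rw [if_neg hp]
        have hlen : t.length ≤ n := by simp at hl; omega
        rw [ih _ _ hlen]
        cases t with
        | nil =>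
          simp [repFn]
        | cons c1 t' =>
          have hne : ¬(c = p0 ∧ c1 = p1) := by
            intro ⟨h1, h2⟩
            subst h1; subst h2
            simp [List.isPrefixOf] at hp
          simp [repFn, if_neg hne]

lemma replace_eq_repFn (p0 p1 r : Char) (l : List Char) :
    PySem.Chars.replace l [p0, p1] [r] = repFn p0 p1 r l := by
  rw [PySem.Chars.replace]
  simp only [List.isEmpty]
  exact go_eq p0 p1 r l.length l [] le_rfl

-- chain of repFn passes, one per rule
def chain (rs : List (Char × Char × Char)) (l : List Char) : List Char :=
  rs.foldl (fun acc q => repFn q.1 q.2.1 q.2.2 acc) l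

def RULES : List (Char × Char × Char) :=
  [('a', 'a', 'ā'), ('i', 'i', 'ī'), ('u', 'u', 'ū'), ('.', 't', 'ṭ'), ('.', 'd', 'ḍ'),
   ('~', 'n', 'ñ'), ('.', 'n', 'ṇ'), ('"', 'n', 'ṅ'), ('.', 'l', 'ḷ'), ('.', 'm', 'ṃ')]

lemma velA_toList (s : String) : (vel_to_uni s).toList = chain RULES s.toList := by
  simp [vel_to_uni, velRules, chain, RULES, List.foldl, PySem.Str.toList_replace,
    replace_eq_repFn]

lemma velB_toList (s : String) : (vel_to_uni_alt s).toList = velScan s.toList := by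
  simp [vel_to_uni_alt]

lemma repFn_one (p0 p1 r c : Char) : repFn p0 p1 r [c] = [c] := rfl

lemma repFn_cons_ne (p0 p1 r c : Char) (h : c ≠ p0) (w : List Char) :
    repFn p0 p1 r (c :: w) = c :: repFn p0 p1 r w := by
  cases w with
  | nil => rfl
  | cons c1 t =>
    simp only [repFn]
    rw [if_neg (fun h' : c = p0 ∧ c1 = p1 => h h'.1)]

lemma repFn_match (p0 p1 r : Char) (t : List Char) :
    repFn p0 p1 r (p0 :: p1 :: t) = r :: repFn p0 p1 r t := by
  simp [repFn]

lemma chain_nil (rs : List (Char × Char × Char)) : chain rs [] = [] := by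
  induction rs with
  | nil => rfl
  | cons q rs ih => simpa [chain, repFn] using ih

lemma chain_one (c : Char) (rs : List (Char × Char × Char)) : chain rs [c] = [c] := by
  induction rs with
  | nil => rfl
  | cons q rs ih => simpa [chain, repFn] using ih

lemma chain_cons_ne (c : Char) :
    ∀ rs : List (Char × Char × Char), (∀ q ∈ rs, q.1 ≠ c) →
      ∀ v, chain rs (c :: v) = c :: chain rs v := by
  intro rs
  induction rs with
  | nil => intro _ v; rfl
  | cons q rs ih =>
    intro hq v
    have h1 : c ≠ q.1 := fun h => hq q (by simp) h.symm
    show chain rs (repFn q.1 q.2.1 q.2.2 (c :: v)) = c :: chain rs (repFn q.1 q.2.1 q.2.2 v)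
    rw [repFn_cons_ne _ _ _ _ h1]
    exact ih (fun p hp => hq p (by simp [hp])) _

lemma chain_cons2 (c0 c1 : Char) :
    ∀ rs : List (Char × Char × Char),
      (∀ q ∈ rs, ¬(c0 = q.1 ∧ c1 = q.2.1) ∧ q.1 ≠ c1) →
      ∀ v, chain rs (c0 :: c1 :: v) = c0 :: c1 :: chain rs v := by
  intro rs
  induction rs with
  | nil => intro _ v; rfl
  | cons q rs ih =>
    intro hq v
    show chain rs (repFn q.1 q.2.1 q.2.2 (c0 :: c1 :: v)) = c0 :: c1 :: chain rs (repFn q.1 q.2.1 q.2.2 v)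
    have h1 : ¬(c0 = q.1 ∧ c1 = q.2.1) := (hq q (by simp)).1
    have h2 : c1 ≠ q.1 := fun h => (hq q (by simp)).2 h.symm
    rw [show repFn q.1 q.2.1 q.2.2 (c0 :: c1 :: v) = c0 :: repFn q.1 q.2.1 q.2.2 (c1 :: v) by
      simp [repFn, if_neg h1]]
    rw [repFn_cons_ne _ _ _ _ h2]
    exact ih (fun p hp => hq p (by simp [hp])) _

lemma chain_match (c0 c1 r : Char) (pre post : List (Char × Char × Char))
    (hR : RULES = pre ++ (c0, c1, r) :: post)
    (hpre : ∀ q ∈ pre, ¬(c0 = q.1 ∧ c1 = q.2.1) ∧ q.1 ≠ c1)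
    (hpost : ∀ q ∈ post, q.1 ≠ r) (t : List Char) :
    chain RULES (c0 :: c1 :: t) = r :: chain RULES t := by
  rw [hR]
  show List.foldl _ (c0 :: c1 :: t) (pre ++ (c0, c1, r) :: post) =
    r :: List.foldl _ t (pre ++ (c0, c1, r) :: post)
  rw [List.foldl_append, List.foldl_append, List.foldl_cons, List.foldl_cons]
  rw [show List.foldl (fun acc q => repFn q.1 q.2.1 q.2.2 acc) (c0 :: c1 :: t) pre
      = chain pre (c0 :: c1 :: t) from rfl,
    chain_cons2 c0 c1 pre hpre t]
  rw [repFn_match]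
  exact chain_cons_ne r post hpost _

-- the second character of a rule pattern is never a replacement character
lemma snd_not_repl : ∀ q ∈ RULES, q.2.1 ∉ RULES.map (fun p => p.2.2) := by decide

-- a replacement character is never the first character of a rule pattern
lemma repl_mem (q : Char × Char × Char) (hq : q ∈ RULES) : q.2.2 ∈ RULES.map (fun p => p.2.2) :=
  List.mem_map_of_mem hq

lemma chain_nomatch (c0 c1 : Char) (hno : ∀ q ∈ RULES, ¬(q.1 = c0 ∧ q.2.1 = c1)) :
    ∀ rs : List (Char × Char × Char), (∀ q ∈ rs, q ∈ RULES) →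
      ∀ (h : Char) (v : List Char), (h = c1 ∨ h ∈ RULES.map (fun p => p.2.2)) →
        chain rs (c0 :: h :: v) = c0 :: chain rs (h :: v) := by
  intro rs
  induction rs with
  | nil => intro _ h v _; rfl
  | cons q rs ih =>
    intro hmem h v hh
    have hqR : q ∈ RULES := hmem q (by simp)
    have hcond : ¬(c0 = q.1 ∧ h = q.2.1) := by
      rintro ⟨rfl, rfl⟩
      rcases hh with rfl | hrep
      · exact hno q hqR ⟨rfl, rfl⟩
      · exact snd_not_repl q hqR hrep
    show chain rs (repFn q.1 q.2.1 q.2.2 (c0 :: h :: v)) =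
      c0 :: chain rs (repFn q.1 q.2.1 q.2.2 (h :: v))
    rw [show repFn q.1 q.2.1 q.2.2 (c0 :: h :: v) = c0 :: repFn q.1 q.2.1 q.2.2 (h :: v) by
      simp [repFn, if_neg hcond]]
    have hmem' : ∀ p ∈ rs, p ∈ RULES := fun p hp => hmem p (by simp [hp])
    cases v with
    | nil =>
      rw [repFn_one]
      exact ih hmem' h [] hh
    | cons c2 v2 =>
      by_cases hm : h = q.1 ∧ c2 = q.2.1
      · rw [show repFn q.1 q.2.1 q.2.2 (h :: c2 :: v2) = q.2.2 :: repFn q.1 q.2.1 q.2.2 v2 by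
          simp [repFn, if_pos hm]]
        exact ih hmem' q.2.2 _ (Or.inr (repl_mem q hqR))
      · rw [show repFn q.1 q.2.1 q.2.2 (h :: c2 :: v2) = h :: repFn q.1 q.2.1 q.2.2 (c2 :: v2) by
          simp [repFn, if_neg hm]]
        exact ih hmem' h _ hh

lemma lookup_none_nomatch (c0 c1 : Char)
    (hl : velTable.lookup (c0, c1) = none) :
    ∀ q ∈ RULES, ¬(q.1 = c0 ∧ q.2.1 = c1) := by
  simp only [velTable, List.lookup_cons, List.lookup_nil] at hl
  repeat' split at hl
  all_goals simp_all [RULES]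
  all_goals refine ⟨?_, ?_, ?_, ?_, ?_, ?_, ?_, ?_, ?_, ?_⟩ <;>
    (intro h hx; subst h; subst hx; simp_all)

lemma lookup_some_mem (c0 c1 r : Char)
    (hl : velTable.lookup (c0, c1) = some r) : (c0, c1, r) ∈ RULES := by
  simp only [velTable, List.lookup_cons, List.lookup_nil] at hl
  repeat' split at hl
  all_goals simp_all [RULES, Prod.ext_iff]
  all_goals exact hl.symm

lemma lookup_some_match (c0 c1 r : Char) (t : List Char)
    (hl : velTable.lookup (c0, c1) = some r) :
    chain RULES (c0 :: c1 :: t) = r :: chain RULES t := by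
  have hm := lookup_some_mem c0 c1 r hl
  simp only [RULES, List.mem_cons, List.not_mem_nil, or_false] at hm
  rcases hm with h | h | h | h | h | h | h | h | h | h <;>
    (obtain ⟨rfl, rfl, rfl⟩ := by simpa [Prod.ext_iff] using h)
  · exact chain_match _ _ _ [] (RULES.drop 1) rfl (by decide) (by decide) t
  · exact chain_match _ _ _ (RULES.take 1) (RULES.drop 2) rfl (by decide) (by decide) t
  · exact chain_match _ _ _ (RULES.take 2) (RULES.drop 3) rfl (by decide) (by decide) t
  · exact chain_match _ _ _ (RULES.take 3) (RULES.drop 4) rfl (by decide) (by decide) t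
  · exact chain_match _ _ _ (RULES.take 4) (RULES.drop 5) rfl (by decide) (by decide) t
  · exact chain_match _ _ _ (RULES.take 5) (RULES.drop 6) rfl (by decide) (by decide) t
  · exact chain_match _ _ _ (RULES.take 6) (RULES.drop 7) rfl (by decide) (by decide) t
  · exact chain_match _ _ _ (RULES.take 7) (RULES.drop 8) rfl (by decide) (by decide) t
  · exact chain_match _ _ _ (RULES.take 8) (RULES.drop 9) rfl (by decide) (by decide) t
  · exact chain_match _ _ _ (RULES.take 9) [] rfl (by decide) (by decide) t

lemma chain_eq_scan_bounded : ∀ (n : Nat) (l : List Char), l.length ≤ n →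
    chain RULES l = velScan l := by
  intro n
  induction n with
  | zero =>
    intro l hl
    have : l = [] := List.eq_nil_of_length_eq_zero (Nat.le_zero.mp hl)
    subst this
    rw [chain_nil]; rfl
  | succ n ih =>
    intro l hl
    match l with
    | [] => rw [chain_nil]; rfl
    | [c] => rw [chain_one]; rfl
    | c0 :: c1 :: t =>
      cases hcase : velTable.lookup (c0, c1) with
      | some r =>
        rw [lookup_some_match c0 c1 r t hcase,
          ih t (by simp at hl; omega)]
        simp [velScan, hcase]
      | none =>
        rw [chain_nomatch c0 c1
          (lookup_none_nomatch c0 c1 hcase) RULES (fun q hq => hq) c1 t (Or.inl rfl),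
          ih (c1 :: t) (by simp at hl ⊢; omega)]
        simp [velScan, hcase]

lemma chain_eq_scan (l : List Char) : chain RULES l = velScan l :=
  chain_eq_scan_bounded l.length l le_rfl

-- ===== VERDICT (by name: the statement is the Claim_ definition above) =====
theorem vel_to_uni_spec : Claim_equal_vel_to_uni := by
  intro s _
  unfold Spec_vel_to_uni
  apply String.toList_inj.mp
  rw [velA_toList, velB_toList, chain_eq_scan]
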